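-- pv_equiv track=rewrite | github.com/ADITYAANAND0707/milestone1-agent | chatbot/server.py | _prepare_anthropic_messages
-- ===== SOURCE A (Python) =====
-- def _prepare_anthropic_messages(messages):
--     """Prepare messages for Anthropic API (must alternate user/assistant).
--     Extracts system messages into a separate string, merges consecutive same-role messages."""
--     system_parts = []
--     chat_messages = []
--     for msg in messages:
--         role = msg.get("role", "user")
--         content = msg.get("content", "")
--         if not content:
--             continue
--         if role == "system":
--             system_parts.append(content)
--         elif role in ("user", "assistant"):
--             if chat_messages and chat_messages[-1]["role"] == role:
--                 chat_messages[-1]["content"] += "\n\n" + content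
--             else:
--                 chat_messages.append({"role": role, "content": content})
--     if chat_messages and chat_messages[0]["role"] != "user":
--         chat_messages.insert(0, {"role": "user", "content": "Hello"})
--     if not chat_messages:
--         chat_messages = [{"role": "user", "content": "Hello"}]
--     return "\n\n".join(system_parts), chat_messages
-- ===== SOURCE B (Python) =====
-- def _dc(msgs):
--     """Divide and conquer: returns (system_parts, chat) for this slice."""
--     if not msgs:
--         return [], []
--     if len(msgs) == 1:
--         m = msgs[0]
--         role = m.get("role", "user")
--         content = m.get("content", "")
--         if not content:
--             return [], []
--         if role == "system":
--             return [content], []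
--         if role in ("user", "assistant"):
--             return [], [{"role": role, "content": content}]
--         return [], []
--     mid = len(msgs) // 2
--     s1, c1 = _dc(msgs[:mid])
--     s2, c2 = _dc(msgs[mid:])
--     if c1 and c2 and c1[-1]["role"] == c2[0]["role"]:
--         chat = c1[:-1] + [{"role": c1[-1]["role"],
--                            "content": c1[-1]["content"] + "\n\n" + c2[0]["content"]}] + c2[1:]
--     else:
--         chat = c1 + c2
--     return s1 + s2, chat
--
--
-- def _prepare_anthropic_messages(messages):
--     """Prepare messages for Anthropic API: divide-and-conquer over the message
--     list, merging the two halves' chats at the role boundary."""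
--     system_parts, chat = _dc(list(messages))
--     if chat and chat[0]["role"] != "user":
--         chat.insert(0, {"role": "user", "content": "Hello"})
--     if not chat:
--         chat = [{"role": "user", "content": "Hello"}]
--     return "\n\n".join(system_parts), chat
-- ===== Notes on version B (the rewrite author's own statement) =====
-- stated objective: alternative
-- what changed: Replaces A's single stateful loop that appends/mutates the last chat entry by a divide-and-conquer: split the message list in half, recursively build (system_parts, chat) for each half, and merge the halves, gluing the boundary chat messages when their roles match.
import Mathlib
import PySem

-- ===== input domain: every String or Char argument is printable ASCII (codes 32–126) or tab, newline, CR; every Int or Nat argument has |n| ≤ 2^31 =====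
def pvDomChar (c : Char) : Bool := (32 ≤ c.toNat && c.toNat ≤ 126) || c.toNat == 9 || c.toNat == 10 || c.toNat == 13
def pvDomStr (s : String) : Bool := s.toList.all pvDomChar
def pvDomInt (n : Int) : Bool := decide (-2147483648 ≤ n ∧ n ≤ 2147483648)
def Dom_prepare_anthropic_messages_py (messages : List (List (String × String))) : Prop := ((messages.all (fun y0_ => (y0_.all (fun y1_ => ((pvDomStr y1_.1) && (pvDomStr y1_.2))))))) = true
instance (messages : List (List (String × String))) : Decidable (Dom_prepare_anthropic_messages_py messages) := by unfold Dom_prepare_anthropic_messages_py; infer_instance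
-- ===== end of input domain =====

-- B replaces A's stateful merge-as-you-go loop by a divide-and-conquer that
-- recursively prepares each half and glues the boundary; same value, no speed claim.

-- ===== PORT A =====
-- msg.get(k, dflt) on the Python dict built from the pair list (last duplicate wins)
def pvGet (msg : List (String × String)) (k dflt : String) : String :=
  (PySem.Dict.ofList msg).getD k dflt

def pvMsg (r c : String) : List (String × String) := [("role", r), ("content", c)]

-- dict["role"] read on a chat message (the key is always present in the self-built dicts)
def pvRoleOf (m : List (String × String)) : Option String :=
  (m.find? (fun p => p.1 == "role")).map Prod.snd

-- the body of A's user/assistant branch: merge into the last entry in place, or append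
def pvStepA (chat : List (List (String × String))) (role content : String) :
    List (List (String × String)) :=
  match chat.getLast? with
  | some last =>
      if pvRoleOf last == some role then
        chat.dropLast ++
          [last.map (fun p => if p.1 == "content" then (p.1, p.2 ++ "\n\n" ++ content) else p)]
      else chat ++ [pvMsg role content]
  | none => chat ++ [pvMsg role content]

def prepare_anthropic_messages_py (messages : List (List (String × String))) :
    String × (List (List (String × String))) :=
  let st := messages.foldl
    (fun (st : List String × List (List (String × String))) msg =>
      let role := pvGet msg "role" "user"
      let content := pvGet msg "content" ""
      if content == "" then st
      else if role == "system" then (st.1 ++ [content], st.2)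
      else if role == "user" || role == "assistant" then (st.1, pvStepA st.2 role content)
      else st)
    ([], [])
  let chat :=
    match st.2.head? with
    | some h => if !(pvRoleOf h == some "user") then pvMsg "user" "Hello" :: st.2 else st.2
    | none => st.2
  let chat := if chat.isEmpty then [pvMsg "user" "Hello"] else chat
  (PySem.Str.join "\n\n" st.1, chat)

-- ===== PORT B =====
-- m["content"] / m["role"] on the self-built chat dicts (key always present there)
def pvField (m : List (String × String)) (k : String) : String :=
  ((m.find? (fun p => p.1 == k)).map Prod.snd).getD ""

-- the single-message base case of B's _dc
def pvClassify (m : List (String × String)) : List String × List (List (String × String)) :=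
  let role := pvGet m "role" "user"
  let content := pvGet m "content" ""
  if content == "" then ([], [])
  else if role == "system" then ([content], [])
  else if role == "user" || role == "assistant" then ([], [pvMsg role content])
  else ([], [])

-- B's boundary merge of the two halves' chat lists
def pvGlue (c1 c2 : List (List (String × String))) : List (List (String × String)) :=
  match c1.getLast?, c2.head? with
  | some last, some hd =>
      if pvField last "role" == pvField hd "role" then
        c1.dropLast ++
          [pvMsg (pvField last "role")
            (pvField last "content" ++ "\n\n" ++ pvField hd "content")] ++ c2.tail
      else c1 ++ c2
  | _, _ => c1 ++ c2

def pvCombine (a b : List String × List (List (String × String))) :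
    List String × List (List (String × String)) :=
  (a.1 ++ b.1, pvGlue a.2 b.2)

def pvDC : List (List (String × String)) → List String × List (List (String × String))
  | [] => ([], [])
  | [m] => pvClassify m
  | a :: b :: t =>
      pvCombine (pvDC ((a :: b :: t).take ((a :: b :: t).length / 2)))
        (pvDC ((a :: b :: t).drop ((a :: b :: t).length / 2)))
termination_by l => l.length
decreasing_by
  · simp [List.length_take]; omega
  · simp [List.length_drop]; omega

def prepare_anthropic_messages_py_alt (messages : List (List (String × String))) :
    String × (List (List (String × String))) :=
  let st := pvDC messages
  let chat :=
    match st.2.head? with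
    | some h => if !(pvField h "role" == "user") then pvMsg "user" "Hello" :: st.2 else st.2
    | none => st.2
  let chat := if chat.isEmpty then [pvMsg "user" "Hello"] else chat
  (PySem.Str.join "\n\n" st.1, chat)

-- ===== PRECONDITION & SPEC =====
def Spec_prepare_anthropic_messages_py (messages : List (List (String × String))) (out : String × (List (List (String × String)))) : Prop := out = prepare_anthropic_messages_py_alt messages
instance (messages : List (List (String × String))) (out : String × (List (List (String × String)))) : Decidable (Spec_prepare_anthropic_messages_py messages out) := by unfold Spec_prepare_anthropic_messages_py; infer_instance

-- ===== CLAIM (what is proved, stated in full; the proofs are below) =====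
def Claim_equal_prepare_anthropic_messages_py : Prop := ∀ (messages : List (List (String × String))), Dom_prepare_anthropic_messages_py messages → Spec_prepare_anthropic_messages_py messages (prepare_anthropic_messages_py messages)

-- ===== LEMMAS AND PROOFS =====

-- proof-side characterisation: system texts, cleaned (role,content) pairs, and run grouping
def pvSystems (messages : List (List (String × String))) : List String :=
  messages.filterMap (fun m =>
    if pvGet m "role" "user" == "system" && pvGet m "content" "" != "" then
      some (pvGet m "content" "") else none)

def pvCleaned (messages : List (List (String × String))) : List (String × String) :=
  messages.filterMap (fun m =>
    if (pvGet m "role" "user" == "user" || pvGet m "role" "user" == "assistant")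
        && pvGet m "content" "" != "" then
      some (pvGet m "role" "user", pvGet m "content" "") else none)

def pvGroup : List (String × String) → List (List (String × String))
  | [] => []
  | (r, c) :: rest =>
      pvMsg r (PySem.Str.join "\n\n" (c :: (rest.takeWhile (fun p => p.1 == r)).map Prod.snd))
        :: pvGroup (rest.dropWhile (fun p => p.1 == r))
termination_by l => l.length
decreasing_by simpa using Nat.lt_succ_of_le (List.length_dropWhile_le _ _)

theorem pvGroup_nil : pvGroup [] = [] := by simp [pvGroup]

theorem pvGroup_cons (r c : String) (rest : List (String × String)) :
    pvGroup ((r, c) :: rest)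
      = pvMsg r (PySem.Str.join "\n\n"
          (c :: (rest.takeWhile (fun p => p.1 == r)).map Prod.snd))
        :: pvGroup (rest.dropWhile (fun p => p.1 == r)) := by rw [pvGroup]

theorem pv_join_cons_cons (s a b : String) (l : List String) :
    PySem.Str.join s (a :: b :: l) = a ++ s ++ PySem.Str.join s (b :: l) := by
  simp [PySem.Str.join, PySem.Chars.join_cons_cons, String.append_assoc]

theorem pv_join_glue (s a b : String) (l : List String) :
    PySem.Str.join s ((a ++ s ++ b) :: l) = a ++ s ++ PySem.Str.join s (b :: l) := by
  cases l with
  | nil => simp [PySem.Str.join, PySem.Chars.join_singleton]; rw [String.append_assoc]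
  | cons d t => rw [pv_join_cons_cons, pv_join_cons_cons]; simp [String.append_assoc]

theorem pv_join_append (s b : String) (l2 : List String) :
    ∀ (l1 : List String) (a : String),
    PySem.Str.join s (a :: (l1 ++ b :: l2))
      = PySem.Str.join s (a :: l1) ++ s ++ PySem.Str.join s (b :: l2) := by
  intro l1
  induction l1 with
  | nil =>
      intro a
      simp only [List.nil_append]
      rw [pv_join_cons_cons]
      simp [PySem.Str.join, PySem.Chars.join_singleton]
  | cons x t ih =>
      intro a
      rw [List.cons_append, pv_join_cons_cons, ih x, pv_join_cons_cons]
      simp [String.append_assoc]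

theorem pvField_msg_role (r c : String) : pvField (pvMsg r c) "role" = r := by
  simp [pvField, pvMsg, List.find?]

theorem pvField_msg_content (r c : String) : pvField (pvMsg r c) "content" = c := by
  simp [pvField, pvMsg, List.find?]

-- collapsing a run of cleaned messages that all carry role r
theorem pv_run (r : String) :
    ∀ (run : List (String × String)), (∀ p ∈ run, p.1 = r) →
    ∀ (chat : List (List (String × String))) (c : String),
    List.foldl (fun ch (p : String × String) => pvStepA ch p.1 p.2) (chat ++ [pvMsg r c]) run
      = chat ++ [pvMsg r (PySem.Str.join "\n\n" (c :: run.map Prod.snd))] := by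
  intro run
  induction run generalizing r with
  | nil => intro _ chat c; simp [PySem.Str.join, PySem.Chars.join_singleton]
  | cons p t ih =>
      intro h chat c
      obtain ⟨r2, c2⟩ := p
      have hr : r2 = r := h (r2, c2) (by simp)
      subst hr
      have hstep : pvStepA (chat ++ [pvMsg r2 c]) r2 c2
          = chat ++ [pvMsg r2 (c ++ "\n\n" ++ c2)] := by
        simp [pvStepA, pvRoleOf, pvMsg, List.find?]
      simp only [List.foldl_cons, hstep]
      rw [ih r2 (fun q hq => h q (by simp [hq])) chat (c ++ "\n\n" ++ c2)]
      rw [List.map_cons, pv_join_glue, pv_join_cons_cons]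

theorem pv_head_dropWhile {α : Type} (q : α → Bool) :
    ∀ (l : List α) (p : α), (l.dropWhile q).head? = some p → q p = false := by
  intro l
  induction l with
  | nil => intro p h; simp [List.dropWhile] at h
  | cons x t ih =>
      intro p h
      by_cases hx : q x = true
      · rw [List.dropWhile_cons_of_pos hx] at h; exact ih p h
      · rw [List.dropWhile_cons_of_neg hx] at h
        simp at h; subst h; simpa using hx

-- A's merge loop equals the run-grouping of the cleaned pairs
theorem pv_fold_group :
    ∀ (n : Nat) (l : List (String × String)), l.length ≤ n →
    ∀ (chat : List (List (String × String))),
    (match chat.getLast?, l.head? with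
     | some last, some p => ¬ (pvRoleOf last = some p.1)
     | _, _ => True) →
    List.foldl (fun ch (p : String × String) => pvStepA ch p.1 p.2) chat l
      = chat ++ pvGroup l := by
  intro n
  induction n with
  | zero =>
      intro l hl chat _
      have : l = [] := List.eq_nil_of_length_eq_zero (Nat.le_zero.mp hl)
      subst this; simp [pvGroup]
  | succ n ih =>
      intro l hl chat hhead
      cases l with
      | nil => simp [pvGroup]
      | cons p rest =>
          obtain ⟨r, c⟩ := p
          have hstep : pvStepA chat r c = chat ++ [pvMsg r c] := by
            unfold pvStepA
            cases hg : chat.getLast? with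
            | none => simp
            | some last =>
                have : ¬ (pvRoleOf last = some r) := by
                  simpa [hg] using hhead
                simp [this]
          have hsplit : rest = rest.takeWhile (fun p => p.1 == r)
              ++ rest.dropWhile (fun p => p.1 == r) :=
            (List.takeWhile_append_dropWhile).symm
          simp only [List.foldl_cons, hstep]
          rw [show (List.foldl (fun ch (p : String × String) => pvStepA ch p.1 p.2)
                (chat ++ [pvMsg r c]) rest)
              = List.foldl (fun ch (p : String × String) => pvStepA ch p.1 p.2)
                (chat ++ [pvMsg r c])
                (rest.takeWhile (fun p => p.1 == r) ++ rest.dropWhile (fun p => p.1 == r))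
            from by rw [← hsplit]]
          rw [List.foldl_append]
          rw [pv_run r _ (fun q hq => by simpa using List.mem_takeWhile_imp hq) chat c]
          rw [ih (rest.dropWhile (fun p => p.1 == r))
                (le_trans (List.length_dropWhile_le _ _) (Nat.le_of_succ_le_succ hl))
                (chat ++ [pvMsg r (PySem.Str.join "\n\n"
                  (c :: (rest.takeWhile (fun p => p.1 == r)).map Prod.snd))])
                ?_]
          · rw [pvGroup]; simp
          · cases hh : (rest.dropWhile (fun p => p.1 == r)).head? with
            | none => simp
            | some q =>
                have hq := pv_head_dropWhile _ rest q hh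
                have hne : q.1 ≠ r := by simpa using hq
                simp [pvRoleOf, pvMsg, List.find?]
                exact fun h => hne h.symm

-- A's single loop splits into the two filter passes feeding the merge loop
theorem pv_split :
    ∀ (messages : List (List (String × String)))
      (sys : List String) (chat : List (List (String × String))),
    messages.foldl
      (fun (st : List String × List (List (String × String))) msg =>
        let role := pvGet msg "role" "user"
        let content := pvGet msg "content" ""
        if content == "" then st
        else if role == "system" then (st.1 ++ [content], st.2)
        else if role == "user" || role == "assistant" then (st.1, pvStepA st.2 role content)
        else st)
      (sys, chat)
      = (sys ++ pvSystems messages,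
         List.foldl (fun ch (p : String × String) => pvStepA ch p.1 p.2) chat
           (pvCleaned messages)) := by
  intro messages
  induction messages with
  | nil => intro sys chat; simp [pvSystems, pvCleaned]
  | cons m t ih =>
      intro sys chat
      rw [List.foldl_cons]
      by_cases hc : pvGet m "content" "" = ""
      · rw [show (let role := pvGet m "role" "user"
            let content := pvGet m "content" ""
            if content == "" then (sys, chat)
            else if role == "system" then (sys ++ [content], chat)
            else if role == "user" || role == "assistant" then (sys, pvStepA chat role content)
            else (sys, chat)) = (sys, chat) from by simp [hc]]
        rw [ih]
        simp [pvSystems, pvCleaned, List.filterMap_cons, hc]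
      · by_cases hsys : pvGet m "role" "user" = "system"
        · rw [show (let role := pvGet m "role" "user"
              let content := pvGet m "content" ""
              if content == "" then (sys, chat)
              else if role == "system" then (sys ++ [content], chat)
              else if role == "user" || role == "assistant" then (sys, pvStepA chat role content)
              else (sys, chat)) = (sys ++ [pvGet m "content" ""], chat) from by simp [hc, hsys]]
          rw [ih]
          simp [pvSystems, pvCleaned, List.filterMap_cons, hc, hsys]
        · by_cases hu : pvGet m "role" "user" = "user" ∨ pvGet m "role" "user" = "assistant"
          · rw [show (let role := pvGet m "role" "user"
                let content := pvGet m "content" ""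
                if content == "" then (sys, chat)
                else if role == "system" then (sys ++ [content], chat)
                else if role == "user" || role == "assistant" then (sys, pvStepA chat role content)
                else (sys, chat))
                = (sys, pvStepA chat (pvGet m "role" "user") (pvGet m "content" "")) from by
                  rcases hu with hu | hu <;> simp [hc, hsys, hu]]
            rw [ih]
            simp [pvSystems, pvCleaned, List.filterMap_cons, hc, hsys, hu]
          · have h1 : pvGet m "role" "user" ≠ "user" := fun h => hu (Or.inl h)
            have h2 : pvGet m "role" "user" ≠ "assistant" := fun h => hu (Or.inr h)
            rw [show (let role := pvGet m "role" "user"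
                let content := pvGet m "content" ""
                if content == "" then (sys, chat)
                else if role == "system" then (sys ++ [content], chat)
                else if role == "user" || role == "assistant" then (sys, pvStepA chat role content)
                else (sys, chat)) = (sys, chat) from by simp [hc, hsys, h1, h2]]
            rw [ih]
            simp [pvSystems, pvCleaned, List.filterMap_cons, hc, hsys, h1, h2]

theorem pvGroup_ne_nil (l : List (String × String)) (h : l ≠ []) : pvGroup l ≠ [] := by
  cases l with
  | nil => exact absurd rfl h
  | cons p t => obtain ⟨r, c⟩ := p; rw [pvGroup]; simp

theorem pvGlue_cons (x : List (String × String)) (A B : List (List (String × String)))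
    (h : A ≠ []) : pvGlue (x :: A) B = x :: pvGlue A B := by
  unfold pvGlue
  rw [List.getLast?_cons]
  cases hA : A.getLast? with
  | none => exact absurd (List.getLast?_eq_none_iff.mp hA) h
  | some last =>
      cases B.head? with
      | none => simp
      | some hd =>
          simp only [Option.getD_some]
          by_cases hr : (pvField last "role" == pvField hd "role") = true
          · simp [hr, List.dropLast_cons_of_ne_nil h]
          · simp [hr]

theorem pvGroup_append :
    ∀ (n : Nat) (l1 : List (String × String)), l1.length ≤ n →
    ∀ (l2 : List (String × String)),
    pvGroup (l1 ++ l2) = pvGlue (pvGroup l1) (pvGroup l2) := by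
  intro n
  induction n with
  | zero =>
      intro l1 hl _
      have : l1 = [] := List.eq_nil_of_length_eq_zero (Nat.le_zero.mp hl)
      subst this; simp [pvGroup_nil, pvGlue]
  | succ n ih =>
      intro l1 hl l2
      cases l1 with
      | nil => simp [pvGroup_nil, pvGlue]
      | cons p rest =>
          obtain ⟨r, c⟩ := p
          rw [List.cons_append, pvGroup_cons, pvGroup_cons]
          by_cases hd : rest.dropWhile (fun p => p.1 == r) = []
          · -- whole rest has role r
            have htw : rest.takeWhile (fun p => p.1 == r) = rest := by
              have := List.takeWhile_append_dropWhile
                (p := fun p : String × String => p.1 == r) (l := rest)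
              rw [hd, List.append_nil] at this; exact this
            have hlen : (rest.takeWhile (fun p => p.1 == r)).length = rest.length := by
              rw [htw]
            rw [List.takeWhile_append, if_pos hlen, List.dropWhile_append,
                if_pos (show (List.dropWhile (fun p => p.1 == r) rest).isEmpty = true from by
                  simp [hd])]
            rw [hd, pvGroup_nil]
            cases l2 with
            | nil => simp [pvGlue, htw, pvGroup_nil]
            | cons q t2 =>
                obtain ⟨r2, c2⟩ := q
                by_cases hr : r2 = r
                · subst hr
                  rw [List.takeWhile_cons_of_pos (by simp), List.dropWhile_cons_of_pos (by simp),
                      pvGroup_cons]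
                  simp only [pvGlue, List.getLast?_singleton, List.head?_cons,
                    pvField_msg_role, pvField_msg_content, beq_self_eq_true, if_true,
                    List.dropLast_singleton, List.nil_append, List.tail_cons]
                  rw [htw, List.map_append, List.map_cons]
                  rw [pv_join_append]
                  simp
                · rw [List.takeWhile_cons_of_neg (by simpa using hr),
                      List.dropWhile_cons_of_neg (by simpa using hr), pvGroup_cons]
                  simp only [pvGlue, List.getLast?_singleton, List.head?_cons,
                    pvField_msg_role]
                  rw [if_neg (by simpa using fun h => hr h.symm)]
                  simp [htw]
          · -- the run ends inside rest
            have hlt : (rest.takeWhile (fun p => p.1 == r)).length ≠ rest.length := by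
              intro he
              exact hd (by
                have := List.takeWhile_append_dropWhile
                  (p := fun p : String × String => p.1 == r) (l := rest)
                have hlen := congrArg List.length this
                rw [List.length_append, he] at hlen
                have : (rest.dropWhile (fun p => p.1 == r)).length = 0 := by omega
                exact List.eq_nil_of_length_eq_zero this)
            rw [List.takeWhile_append, if_neg hlt, List.dropWhile_append,
                if_neg (by simpa using hd)]
            rw [ih (rest.dropWhile (fun p => p.1 == r))
                  (le_trans (List.length_dropWhile_le _ _) (Nat.le_of_succ_le_succ hl)) l2]
            rw [pvGlue_cons _ _ _ (pvGroup_ne_nil _ hd)]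

-- the single-message base case matches the filters + grouping
theorem pvClassify_eq (m : List (String × String)) :
    pvClassify m = (pvSystems [m], pvGroup (pvCleaned [m])) := by
  unfold pvClassify pvSystems pvCleaned
  by_cases hc : pvGet m "content" "" = ""
  · simp [hc, List.filterMap_cons, pvGroup_nil]
  · by_cases hsys : pvGet m "role" "user" = "system"
    · simp [hc, hsys, List.filterMap_cons, pvGroup_nil]
    · by_cases hu : pvGet m "role" "user" = "user" ∨ pvGet m "role" "user" = "assistant"
      · have hor : (pvGet m "role" "user" == "user"
            || pvGet m "role" "user" == "assistant") = true := by
          rcases hu with hu | hu <;> simp [hu]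
        simp only [List.filterMap_cons, List.filterMap_nil]
        simp [hor, hc, hsys]
        rw [pvGroup_cons]
        simp [pvGroup_nil, PySem.Str.join, PySem.Chars.join_singleton]
      · have h1 : pvGet m "role" "user" ≠ "user" := fun h => hu (Or.inl h)
        have h2 : pvGet m "role" "user" ≠ "assistant" := fun h => hu (Or.inr h)
        simp [hc, hsys, h1, h2, List.filterMap_cons, pvGroup_nil]

-- B's divide and conquer computes exactly (system texts, grouped cleaned pairs)
theorem pvDC_eq :
    ∀ (n : Nat) (l : List (List (String × String))), l.length ≤ n →
    pvDC l = (pvSystems l, pvGroup (pvCleaned l)) := by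
  intro n
  induction n with
  | zero =>
      intro l hl
      have : l = [] := List.eq_nil_of_length_eq_zero (Nat.le_zero.mp hl)
      subst this; simp [pvDC, pvSystems, pvCleaned, pvGroup_nil]
  | succ n ih =>
      intro l hl
      match l with
      | [] => simp [pvDC, pvSystems, pvCleaned, pvGroup_nil]
      | [m] => rw [show pvDC [m] = pvClassify m from by rw [pvDC]]; exact pvClassify_eq m
      | a :: b :: t =>
          rw [show pvDC (a :: b :: t)
              = pvCombine (pvDC ((a :: b :: t).take ((a :: b :: t).length / 2)))
                  (pvDC ((a :: b :: t).drop ((a :: b :: t).length / 2))) from by rw [pvDC]]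
          have h2 : (a :: b :: t).length = t.length + 2 := by simp
          rw [ih _ (by simp [List.length_take]; omega)]
          rw [ih _ (by simp [List.length_drop] at *; omega)]
          unfold pvCombine
          simp only
          rw [← pvGroup_append (pvCleaned ((a :: b :: t).take ((a :: b :: t).length / 2))).length
                _ le_rfl]
          rw [show pvCleaned ((a :: b :: t).take ((a :: b :: t).length / 2))
                ++ pvCleaned ((a :: b :: t).drop ((a :: b :: t).length / 2))
              = pvCleaned (a :: b :: t) from by
            unfold pvCleaned; rw [← List.filterMap_append, List.take_append_drop]]
          rw [show pvSystems ((a :: b :: t).take ((a :: b :: t).length / 2))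
                ++ pvSystems ((a :: b :: t).drop ((a :: b :: t).length / 2))
              = pvSystems (a :: b :: t) from by
            unfold pvSystems; rw [← List.filterMap_append, List.take_append_drop]]

-- ===== VERDICT (by name: the statement is the Claim_ definition above) =====
theorem prepare_anthropic_messages_py_spec : Claim_equal_prepare_anthropic_messages_py := by
  intro messages _
  unfold Spec_prepare_anthropic_messages_py prepare_anthropic_messages_py
    prepare_anthropic_messages_py_alt
  rw [pv_split messages [] []]
  rw [pv_fold_group (pvCleaned messages).length (pvCleaned messages) le_rfl []
      (by cases (pvCleaned messages).head? <;> simp)]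
  rw [pvDC_eq messages.length messages le_rfl]
  simp only [List.nil_append]
  cases hc : pvCleaned messages with
  | nil => simp [pvGroup_nil]
  | cons p t =>
      obtain ⟨r, c⟩ := p
      rw [pvGroup_cons]
      simp [pvRoleOf, pvField_msg_role, pvMsg, List.find?, pvField]
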